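-- pv_equiv track=rewrite | github.com/Bhavik-Gilbert/Advent-Of-Code | 2024/day7.py | valid_equation_1
-- ===== SOURCE A (Python) =====
-- VALID_OPERATORS_1 = ["+", "*"]
--
-- def perform_operation(val1, val2, operator):
--     if operator == "+":
--         return val1 + val2
--     elif operator == "*":
--         return val1 * val2
--     elif operator == "||":
--         return int(str(val1) + str(val2))
--
--     raise Exception("Invalid operator provided")
--
-- def valid_equation_1(answer, values):
--     if len(values) < 2:
--         return False
--
--     if len(values) == 2:
--         val1 = values[0]
--         val2 = values[1]
--         for operator in VALID_OPERATORS_1: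
--             current_answer = perform_operation(val1, val2, operator)
--             if current_answer == answer:
--                 return True
--
--         return False
--
--     val1 = values[0]
--     val2 = values[1]
--     for operator in VALID_OPERATORS_1:
--         sub_answer = perform_operation(val1, val2, operator)
--         if valid_equation_1(answer, [sub_answer, *values[2:]]):
--             return True
--
--     return False
-- ===== SOURCE B (Python) =====
-- def valid_equation_1(answer, values):
--     # Work backwards from the answer: undo the last value by subtraction always,
--     # and by division only when it divides the target (v == 0 needs target == 0).
--     if len(values) < 2:
--         return False
--
--     def ok(t, rv):
--         # rv: remaining values, reversed, nonempty
--         if len(rv) == 1: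
--             return t == rv[0]
--         v, rest = rv[0], rv[1:]
--         if ok(t - v, rest):
--             return True
--         if v == 0:
--             return t == 0
--         return t % v == 0 and ok(t // v, rest)
--
--     return ok(answer, values[::-1])
-- ===== Notes on version B (the rewrite author's own statement) =====
-- stated objective: faster
-- what changed: B replaces A's forward enumeration of all 2^(n-1) operator sequences by a backward search from the answer that undoes the last value (always by subtraction, by division only when it divides the target), pruning non-divisible branches.
import Mathlib
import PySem

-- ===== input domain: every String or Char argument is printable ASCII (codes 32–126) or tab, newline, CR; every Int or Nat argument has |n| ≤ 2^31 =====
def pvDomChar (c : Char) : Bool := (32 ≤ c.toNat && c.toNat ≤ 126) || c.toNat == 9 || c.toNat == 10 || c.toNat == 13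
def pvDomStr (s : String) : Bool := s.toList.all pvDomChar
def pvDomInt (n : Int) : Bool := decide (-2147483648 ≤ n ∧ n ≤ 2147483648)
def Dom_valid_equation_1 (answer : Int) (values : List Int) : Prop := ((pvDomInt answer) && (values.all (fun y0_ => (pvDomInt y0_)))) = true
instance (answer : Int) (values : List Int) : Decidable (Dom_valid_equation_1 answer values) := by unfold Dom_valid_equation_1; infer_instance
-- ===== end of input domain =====

-- B replaces A's forward enumeration of all operator sequences by a backward search from
-- the answer (undo the last value by subtraction, or by division when it divides); faster
-- in a timing run's measurement.

-- ===== PORT A =====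
def VALID_OPERATORS_1 : List String := ["+", "*"]

-- perform_operation: the "||" branch is exact via PySem.Int (never reached from valid_equation_1);
-- none = the final `raise Exception`.
def performOperation (val1 val2 : Int) (operator : String) : Option Int :=
  if operator == "+" then some (val1 + val2)
  else if operator == "*" then some (val1 * val2)
  else if operator == "||" then PySem.Int.ofStr? (PySem.Int.toStr val1 ++ PySem.Int.toStr val2)
  else none

def valid_equation_1 (answer : Int) (values : List Int) : Bool :=
  match values with
  | [] => false
  | [_] => false
  | [val1, val2] =>
      VALID_OPERATORS_1.any (fun operator =>
        (performOperation val1 val2 operator).elim false (fun currentAnswer => currentAnswer == answer))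
  | val1 :: val2 :: r1 :: rest =>
      VALID_OPERATORS_1.any (fun operator =>
        (performOperation val1 val2 operator).elim false
          (fun subAnswer => valid_equation_1 answer (subAnswer :: r1 :: rest)))
termination_by values.length
decreasing_by simp

-- ===== PORT B =====
def altOk (t : Int) (rv : List Int) : Bool :=
  match rv with
  | [] => false
  | [v] => t == v
  | v :: rest =>
      altOk (t - v) rest ||
        (if v == 0 then t == 0
         else (PySem.Int.mod t v == 0) && altOk (PySem.Int.floordiv t v) rest)

def valid_equation_1_alt (answer : Int) (values : List Int) : Bool :=
  if values.length < 2 then false else altOk answer values.reverse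

-- ===== PRECONDITION & SPEC =====
def Spec_valid_equation_1 (answer : Int) (values : List Int) (out : Bool) : Prop := out = valid_equation_1_alt answer values
instance (answer : Int) (values : List Int) (out : Bool) : Decidable (Spec_valid_equation_1 answer values out) := by unfold Spec_valid_equation_1; infer_instance

-- ===== CLAIM (what is proved, stated in full; the proofs are below) =====
def Claim_equal_valid_equation_1 : Prop := ∀ (answer : Int) (values : List Int), Dom_valid_equation_1 answer values → Spec_valid_equation_1 answer values (valid_equation_1 answer values)


-- ===== LEMMAS AND PROOFS =====

-- reference predicate: folding left over vs starting from acc can reach t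
def canMake (acc : Int) (vs : List Int) (t : Int) : Bool :=
  match vs with
  | [] => acc == t
  | v :: rest => canMake (acc + v) rest t || canMake (acc * v) rest t

theorem A_nil (answer : Int) : valid_equation_1 answer [] = false := by
  rw [valid_equation_1]

theorem A_one (answer v : Int) : valid_equation_1 answer [v] = false := by
  rw [valid_equation_1]

theorem A_two (answer a b : Int) :
    valid_equation_1 answer [a, b] = ((a + b == answer) || (a * b == answer)) := by
  rw [valid_equation_1]
  simp [VALID_OPERATORS_1, performOperation]

theorem A_step (answer a b c : Int) (r : List Int) :
    valid_equation_1 answer (a :: b :: c :: r) =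
      (valid_equation_1 answer ((a + b) :: c :: r) || valid_equation_1 answer ((a * b) :: c :: r)) := by
  rw [valid_equation_1]
  simp [VALID_OPERATORS_1, performOperation]

theorem A_eq_canMake (vs : List Int) : ∀ (answer acc : Int), vs ≠ [] →
    valid_equation_1 answer (acc :: vs) = canMake acc vs answer := by
  induction vs with
  | nil => intro _ _ h; exact absurd rfl h
  | cons v rest ih =>
    intro answer acc _
    cases rest with
    | nil => rw [A_two]; simp [canMake]
    | cons r2 rest2 =>
      rw [A_step, ih answer (acc + v) (by simp), ih answer (acc * v) (by simp)]
      simp [canMake]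

theorem snoc_canMake (vs : List Int) : ∀ (acc v t : Int),
    canMake acc (vs ++ [v]) t =
      (canMake acc vs (t - v) ||
        (if v == 0 then (t == 0 : Bool)
         else (PySem.Int.mod t v == 0) && canMake acc vs (PySem.Int.floordiv t v))) := by
  induction vs with
  | nil =>
    intro acc v t
    simp only [List.nil_append, canMake]
    by_cases hv : v = 0
    · subst hv
      simp only [beq_self_eq_true, if_pos]
      rw [Bool.eq_iff_iff]
      simp
      omega
    · have hv' : (v == 0) = false := by simp [hv]
      rw [hv']
      simp only [Bool.false_eq_true, if_false]
      have hiff : acc * v = t ↔ (PySem.Int.mod t v = 0 ∧ acc = PySem.Int.floordiv t v) := by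
        have hfm := PySem.Int.floordiv_mul_add_mod t v
        constructor
        · rintro rfl
          have hm : PySem.Int.mod (acc * v) v = 0 := by
            rw [PySem.Int.mod_eq_zero_iff_dvd]; exact Dvd.intro_left acc rfl
          refine ⟨hm, ?_⟩
          have := PySem.Int.floordiv_mul_add_mod (acc * v) v
          rw [hm, add_zero] at this
          exact (mul_right_cancel₀ hv this).symm
        · rintro ⟨hm, rfl⟩
          rw [hm, add_zero] at hfm
          exact hfm
      have h1 : (acc == t - v) = (acc + v == t) := by
        rw [Bool.eq_iff_iff]; simp; omega
      have h2 : (acc * v == t) = ((PySem.Int.mod t v == 0) && (acc == PySem.Int.floordiv t v)) := by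
        rw [Bool.eq_iff_iff]
        simp only [beq_iff_eq, Bool.and_eq_true]
        exact hiff
      rw [h1, h2]
  | cons w rest ih =>
    intro acc v t
    simp only [List.cons_append, canMake]
    rw [ih (acc + w), ih (acc * w)]
    by_cases hv : v = 0
    · simp only [hv, beq_self_eq_true, if_pos]
      cases canMake (acc + w) rest (t - 0) <;> cases canMake (acc * w) rest (t - 0) <;>
        cases (t == 0) <;> simp
    · have hv' : (v == 0) = false := by simp [hv]
      cases canMake (acc + w) rest (t - v) <;> cases canMake (acc * w) rest (t - v) <;>
        cases hm : (PySem.Int.mod t v == 0) <;>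
        cases canMake (acc + w) rest (PySem.Int.floordiv t v) <;>
        cases canMake (acc * w) rest (PySem.Int.floordiv t v) <;> simp [hv']

theorem altOk_eq_canMake (rv : List Int) : ∀ (acc t : Int),
    altOk t (rv ++ [acc]) = canMake acc rv.reverse t := by
  induction rv with
  | nil =>
    intro acc t
    simp only [List.nil_append, List.reverse_nil, altOk, canMake]
    rw [Bool.eq_iff_iff]
    simp only [beq_iff_eq]
    omega
  | cons v rest ih =>
    intro acc t
    have hrec : altOk t (v :: (rest ++ [acc])) =
        (altOk (t - v) (rest ++ [acc]) ||
          (if v == 0 then (t == 0 : Bool)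
           else (PySem.Int.mod t v == 0) && altOk (PySem.Int.floordiv t v) (rest ++ [acc]))) := by
      cases h : rest ++ [acc] with
      | nil => simp at h
      | cons x xs => simp [altOk]
    rw [List.cons_append, hrec, ih, ih]
    rw [List.reverse_cons, snoc_canMake]

-- ===== VERDICT (by name: the statement is the Claim_ definition above) =====
theorem valid_equation_1_spec : Claim_equal_valid_equation_1 := by
  intro answer values _
  unfold Spec_valid_equation_1 valid_equation_1_alt
  match values with
  | [] => simp [A_nil]
  | [v] => simp [A_one]
  | v1 :: v2 :: rest =>
    rw [if_neg (by simp)]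
    rw [A_eq_canMake (v2 :: rest) answer v1 (by simp)]
    have h : (v1 :: v2 :: rest).reverse = (v2 :: rest).reverse ++ [v1] := by simp
    rw [h, altOk_eq_canMake, List.reverse_reverse]
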